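-- pv_equiv track=rewrite | github.com/darrenjwiseman/Motley-Crews-Agent-Battle | motley_crews_play/highlight_geometry.py | orthogonal_straight_segment
-- ===== SOURCE A (Python) =====
-- def orthogonal_straight_segment(r0: int, c0: int, r1: int, c1: int) -> list[tuple[int, int]]:
--     """Inclusive cells on a straight horizontal or vertical segment; empty if not aligned."""
--     if r0 == r1:
--         step = 1 if c1 > c0 else -1
--         return [(r0, c) for c in range(c0, c1 + step, step)]
--     if c0 == c1:
--         step = 1 if r1 > r0 else -1
--         return [(r, c0) for r in range(r0, r1 + step, step)]
--     return []
-- ===== SOURCE B (Python) =====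
-- def orthogonal_straight_segment(r0: int, c0: int, r1: int, c1: int) -> list[tuple[int, int]]:
--     """Inclusive cells on a straight horizontal or vertical segment; empty if not aligned.
--
--     Divide-and-conquer: the varying coordinate's inclusive span is built by
--     recursively splitting the segment at its midpoint (O(log n) depth), not by
--     a linear range scan.
--     """
--     def span(v0: int, v1: int) -> list[int]:
--         if v0 == v1:
--             return [v0]
--         d = v1 - v0
--         s = 1 if d > 0 else -1
--         m = v0 + (abs(d) // 2) * s
--         return span(v0, m) + span(m + s, v1)
--
--     if r0 == r1:
--         return [(r0, c) for c in span(c0, c1)]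
--     if c0 == c1:
--         return [(r, c0) for r in span(r0, r1)]
--     return []
-- ===== Notes on version B (the rewrite author's own statement) =====
-- stated objective: alternative
-- what changed: Replaces A's linear range comprehensions by a divide-and-conquer construction: the varying coordinate's inclusive span is built recursively by splitting the segment at its midpoint and concatenating the two halves (O(log n) recursion depth instead of a single linear scan).
import Mathlib
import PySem

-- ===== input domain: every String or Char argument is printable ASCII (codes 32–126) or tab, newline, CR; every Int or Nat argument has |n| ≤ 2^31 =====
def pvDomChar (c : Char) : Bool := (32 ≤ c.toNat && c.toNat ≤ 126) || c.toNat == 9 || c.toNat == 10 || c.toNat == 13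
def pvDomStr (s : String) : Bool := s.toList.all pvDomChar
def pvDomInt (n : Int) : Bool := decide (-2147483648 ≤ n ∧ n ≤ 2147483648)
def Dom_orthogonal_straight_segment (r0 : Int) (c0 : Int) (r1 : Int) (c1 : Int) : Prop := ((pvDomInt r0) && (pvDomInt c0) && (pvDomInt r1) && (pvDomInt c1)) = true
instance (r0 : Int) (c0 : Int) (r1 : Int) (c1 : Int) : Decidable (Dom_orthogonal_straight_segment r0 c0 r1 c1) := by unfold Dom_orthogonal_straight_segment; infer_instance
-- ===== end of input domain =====

-- B builds the varying coordinate's inclusive span by divide-and-conquer midpoint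
-- splitting instead of A's linear range comprehensions (alternative decomposition).

-- ===== PORT A =====
def orthogonal_straight_segment (r0 : Int) (c0 : Int) (r1 : Int) (c1 : Int) : List (Int × Int) :=
  if r0 = r1 then
    let step : Int := if c1 > c0 then 1 else -1
    (PySem.List.pyRange c0 (c1 + step) step).map (fun c => (r0, c))
  else if c0 = c1 then
    let step : Int := if r1 > r0 then 1 else -1
    (PySem.List.pyRange r0 (r1 + step) step).map (fun r => (r, c0))
  else []

-- ===== PORT B =====
-- helper `span` of Source B: divide-and-conquer inclusive span from v0 to v1
def pvSpan (v0 : Int) (v1 : Int) : List Int :=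
  if v0 = v1 then [v0]
  else
    let d := v1 - v0
    let s : Int := if d > 0 then 1 else -1
    let m := v0 + (d.natAbs / 2 : Nat) * s
    pvSpan v0 m ++ pvSpan (m + s) v1
termination_by (v1 - v0).natAbs
decreasing_by
  all_goals
    simp only [Int.lt_iff_add_one_le]
    split <;> omega

def orthogonal_straight_segment_alt (r0 : Int) (c0 : Int) (r1 : Int) (c1 : Int) : List (Int × Int) :=
  if r0 = r1 then (pvSpan c0 c1).map (fun c => (r0, c))
  else if c0 = c1 then (pvSpan r0 r1).map (fun r => (r, c0))
  else []

-- ===== PRECONDITION & SPEC =====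
def Spec_orthogonal_straight_segment (r0 : Int) (c0 : Int) (r1 : Int) (c1 : Int) (out : List (Int × Int)) : Prop := out = orthogonal_straight_segment_alt r0 c0 r1 c1
instance (r0 : Int) (c0 : Int) (r1 : Int) (c1 : Int) (out : List (Int × Int)) : Decidable (Spec_orthogonal_straight_segment r0 c0 r1 c1 out) := by unfold Spec_orthogonal_straight_segment; infer_instance

-- ===== CLAIM (what is proved, stated in full; the proofs are below) =====
def Claim_equal_orthogonal_straight_segment : Prop := ∀ (r0 : Int) (c0 : Int) (r1 : Int) (c1 : Int), Dom_orthogonal_straight_segment r0 c0 r1 c1 → Spec_orthogonal_straight_segment r0 c0 r1 c1 (orthogonal_straight_segment r0 c0 r1 c1)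

-- ===== LEMMAS AND PROOFS =====

-- canonical form of the inclusive span from a toward b with unit step s
def pvCanon (a : Int) (n : Nat) (s : Int) : List Int :=
  (List.range (n + 1)).map (fun k : Nat => a + (k : Int) * s)

lemma habs_unit (n : Nat) (s : Int) (hs : s = 1 ∨ s = -1) : ((n : Int) * s).natAbs = n := by
  rcases hs with rfl | rfl <;> simp

-- splitting a canonical span after its first n1+1 cells
lemma pvCanon_append (a : Int) (n1 n2 : Nat) (s : Int) :
    pvCanon a (n1 + n2 + 1) s = pvCanon a n1 s ++ pvCanon (a + ((n1 : Int) + 1) * s) n2 s := by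
  unfold pvCanon
  have hsplit : n1 + n2 + 1 + 1 = (n1 + 1) + (n2 + 1) := by omega
  rw [hsplit, List.range_add, List.map_append, List.map_map]
  congr 1
  apply List.map_congr_left
  intro k _
  simp only [Function.comp_apply]
  push_cast
  ring

-- pvSpan equals the canonical span, for any unit step s pointing from v0 to v1
lemma pvSpan_canon : ∀ (n : Nat) (v0 v1 s : Int), (v1 - v0).natAbs = n →
    (s = 1 ∨ s = -1) → 0 ≤ (v1 - v0) * s → pvSpan v0 v1 = pvCanon v0 n s := by
  intro n
  induction n using Nat.strong_induction_on with
  | _ n ih =>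
    intro v0 v1 s hn hs hdir
    by_cases h : v0 = v1
    · subst h
      have h0 : n = 0 := by omega
      subst h0
      simp [pvSpan, pvCanon, List.range_succ]
    · have hn1 : 1 ≤ n := by omega
      rw [pvSpan, if_neg h]
      dsimp only
      have hsgn : (if v1 - v0 > 0 then (1 : Int) else -1) = s := by
        rcases hs with rfl | rfl <;> split <;> omega
      rw [hsgn, hn]
      have hds : v1 - v0 = (n : Int) * s := by
        rcases hs with rfl | rfl <;>
          simp only [mul_one, mul_neg_one] at hdir ⊢ <;> omega
      have ih1 : pvSpan v0 (v0 + ((n / 2 : Nat) : Int) * s) = pvCanon v0 (n / 2) s := by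
        refine ih (n / 2) (by omega) v0 _ s ?_ hs ?_
        · rw [add_sub_cancel_left]; exact habs_unit (n / 2) s hs
        · rw [add_sub_cancel_left]
          rcases hs with rfl | rfl <;> simp only [mul_one, mul_neg_one, neg_neg] <;> positivity
      have ih2 : pvSpan (v0 + ((n / 2 : Nat) : Int) * s + s) v1
          = pvCanon (v0 + ((n / 2 : Nat) : Int) * s + s) (n - 1 - n / 2) s := by
        refine ih (n - 1 - n / 2) (by omega) _ v1 s ?_ hs ?_
        · rcases hs with rfl | rfl <;>
            simp only [mul_one, mul_neg_one] at hds ⊢ <;> omega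
        · rcases hs with rfl | rfl <;>
            simp only [mul_one, mul_neg_one] at hds ⊢ <;> omega
      rw [ih1, ih2]
      have hb : v0 + ((n / 2 : Nat) : Int) * s + s = v0 + (((n / 2 : Nat) : Int) + 1) * s := by ring
      rw [hb]
      have hn' : n = n / 2 + (n - 1 - n / 2) + 1 := by omega
      conv_rhs => rw [hn']
      exact (pvCanon_append v0 (n / 2) (n - 1 - n / 2) s).symm

-- A\'s step-signed pyRange branch equals the canonical span
lemma pyRange_canon (a b : Int) :
    PySem.List.pyRange a (b + (if b > a then (1:Int) else -1)) (if b > a then (1:Int) else -1)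
    = pvCanon a (b - a).natAbs (if b > a then (1:Int) else -1) := by
  unfold pvCanon
  rcases lt_trichotomy a b with h | h | h
  · rw [if_pos h, PySem.List.pyRange_one]
    have hl : (b + 1 - a).toNat = (b - a).natAbs + 1 := by omega
    rw [hl]
    apply List.map_congr_left
    intro k _
    simp
  · subst h
    rw [if_neg (lt_irrefl a), PySem.List.pyRange_neg_one]
    simp [show a - (a + -1) = 1 by omega, List.range_succ]
  · rw [if_neg (by omega : ¬ b > a), PySem.List.pyRange_neg_one]
    have hl : (a - (b + -1)).toNat = (b - a).natAbs + 1 := by omega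
    rw [hl]
    apply List.map_congr_left
    intro k _
    ring

-- the step sign of A\'s branch points from a to b
lemma dir_ok (a b : Int) : 0 ≤ (b - a) * (if b > a then (1:Int) else -1) := by
  split <;> nlinarith

lemma sign_unit (a b : Int) : (if b > a then (1:Int) else -1) = 1 ∨ (if b > a then (1:Int) else -1) = -1 := by
  split <;> simp

-- ===== VERDICT (by name: the statement is the Claim_ definition above) =====
theorem orthogonal_straight_segment_spec : Claim_equal_orthogonal_straight_segment := by
  intro r0 c0 r1 c1 _
  unfold Spec_orthogonal_straight_segment orthogonal_straight_segment orthogonal_straight_segment_alt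
  by_cases hr : r0 = r1
  · rw [if_pos hr, if_pos hr]
    dsimp only
    rw [pyRange_canon c0 c1, pvSpan_canon (c1 - c0).natAbs c0 c1 _ rfl (sign_unit c0 c1) (dir_ok c0 c1)]
  · by_cases hc : c0 = c1
    · rw [if_neg hr, if_neg hr, if_pos hc, if_pos hc]
      dsimp only
      rw [pyRange_canon r0 r1, pvSpan_canon (r1 - r0).natAbs r0 r1 _ rfl (sign_unit r0 r1) (dir_ok r0 r1)]
    · rw [if_neg hr, if_neg hr, if_neg hc, if_neg hc]
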